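-- pv_equiv track=rewrite | github.com/ielzara/Candy-Exercise | candy_problem/candy_problem.py | create_new_candy_data_structure
-- ===== SOURCE A (Python) =====
-- def create_new_candy_data_structure(data):
--     candy_people = {}
--     for friend in data:
--         friend_name = friend[0]
--         candies = friend[1]
--         for candy in candies:
--             if candy not in candy_people:
--                 candy_people[candy] = []
--             candy_people[candy].append(friend_name)
--     return candy_people
-- ===== SOURCE B (Python) =====
-- def create_new_candy_data_structure(data):
--     pairs = [(candy, name) for name, candies in data for candy in candies]
--     keys = list(dict.fromkeys(candy for candy, _ in pairs))
--     return {c: [n for c2, n in pairs if c2 == c] for c in keys}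
-- ===== Notes on version B (the rewrite author's own statement) =====
-- stated objective: alternative
-- what changed: Replaces the incremental insert-if-absent-then-append dict building with a three-stage pipeline: flatten friends into (candy, name) pairs, dedup candies in first-seen order via dict.fromkeys, then build each candy's friend list by a per-key filter over the pairs.
import Mathlib
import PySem

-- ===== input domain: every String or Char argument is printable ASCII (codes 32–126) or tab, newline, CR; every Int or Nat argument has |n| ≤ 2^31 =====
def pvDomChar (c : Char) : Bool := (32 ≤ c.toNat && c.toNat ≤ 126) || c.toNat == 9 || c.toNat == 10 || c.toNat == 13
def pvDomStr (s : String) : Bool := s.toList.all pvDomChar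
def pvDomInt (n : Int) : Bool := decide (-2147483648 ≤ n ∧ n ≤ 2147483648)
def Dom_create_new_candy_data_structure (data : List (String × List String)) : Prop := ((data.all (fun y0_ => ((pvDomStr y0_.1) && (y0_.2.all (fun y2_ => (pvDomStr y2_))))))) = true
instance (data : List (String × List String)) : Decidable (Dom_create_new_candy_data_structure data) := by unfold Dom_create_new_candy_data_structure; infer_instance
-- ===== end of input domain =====

-- B builds the candy→friends index by flatten / ordered-dedup / per-key filter instead of A's incremental dict insertion (alternative decomposition, not faster).

-- ===== PORT A =====
def create_new_candy_data_structure (data : List (String × List String)) : List (String × List String) :=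
  let candy_people := data.foldl (fun cp friend =>
    let friend_name := friend.1
    let candies := friend.2
    candies.foldl (fun cp candy =>
      let cp := if cp.contains candy then cp else cp.insert candy ([] : List String)
      cp.modify candy [] (fun l => l ++ [friend_name])) cp)
    PySem.Dict.empty
  candy_people.items

-- ===== PORT B =====
def create_new_candy_data_structure_alt (data : List (String × List String)) : List (String × List String) :=
  let pairs := data.flatMap (fun f => f.2.map (fun candy => (candy, f.1)))
  let keys := PySem.List.dedup (pairs.map (fun p => p.1))
  keys.map (fun c => (c, (pairs.filter (fun p => p.1 == c)).map (fun p => p.2)))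

-- ===== PRECONDITION & SPEC =====
def Spec_create_new_candy_data_structure (data : List (String × List String)) (out : List (String × List String)) : Prop := out = create_new_candy_data_structure_alt data
instance (data : List (String × List String)) (out : List (String × List String)) : Decidable (Spec_create_new_candy_data_structure data out) := by unfold Spec_create_new_candy_data_structure; infer_instance

-- ===== CLAIM (what is proved, stated in full; the proofs are below) =====
def Claim_equal_create_new_candy_data_structure : Prop := ∀ (data : List (String × List String)), Dom_create_new_candy_data_structure data → Spec_create_new_candy_data_structure data (create_new_candy_data_structure data)

-- ===== LEMMAS AND PROOFS =====

-- A's loop body (insert-if-absent, then append) equals a single Dict.modify, for a dict with Nodup keys.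
theorem step_eq_modify (d : PySem.Dict String (List String)) (c n : String)
    (hnd : d.keys.Nodup) :
    (if d.contains c then d else d.insert c ([] : List String)).modify c [] (fun l => l ++ [n])
      = d.modify c [] (fun l => l ++ [n]) := by
  by_cases h : d.contains c = true
  · simp [h]
  · have h' : d.contains c = false := by simpa using h
    rw [if_neg (by simp [h'])]
    have hnd1 : ((d.insert c ([] : List String)).modify c [] (fun l => l ++ [n])).keys.Nodup := by
      have := PySem.Dict.nodup_keys_foldl_modify_key [c] id ([] : List String)
        (fun _ _ => (fun l => l ++ [n])) (d.insert c ([] : List String))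
        (PySem.Dict.nodup_keys_insert d c [] hnd)
      simpa using this
    have hnd2 : (d.modify c [] (fun l => l ++ [n])).keys.Nodup := by
      have := PySem.Dict.nodup_keys_foldl_modify_key [c] id ([] : List String)
        (fun _ _ => (fun l => l ++ [n])) d hnd
      simpa using this
    apply PySem.Dict.ext
    rw [PySem.Dict.items_eq_map_keys _ hnd1 ([] : List String),
        PySem.Dict.items_eq_map_keys _ hnd2 ([] : List String)]
    have hkeys : ((d.insert c ([] : List String)).modify c [] (fun l => l ++ [n])).keys
        = (d.modify c [] (fun l => l ++ [n])).keys := by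
      rw [PySem.Dict.keys_modify, PySem.Dict.keys_modify,
          PySem.Dict.keys_insert_of_contains _ _ (PySem.Dict.contains_insert_self d c []),
          PySem.Dict.keys_insert_of_not_contains d _ h',
          PySem.Dict.keys_insert_of_not_contains d _ h']
    rw [hkeys]
    apply List.map_congr_left
    intro k hk
    by_cases hkc : k = c
    · subst hkc
      rw [PySem.Dict.getD_modify_self, PySem.Dict.getD_modify_self,
          PySem.Dict.getD_insert_self, PySem.Dict.getD_of_not_contains d ([] : List String) h']
    · rw [PySem.Dict.getD_modify_of_ne _ _ _ hkc, PySem.Dict.getD_modify_of_ne _ _ _ hkc,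
          PySem.Dict.getD_insert_of_ne _ _ _ hkc]

-- The A-side fold with insert-if-absent equals the plain modify fold (keys stay Nodup along the way).
theorem foldl_step_eq_foldl_modify (ps : List (String × String)) :
    ∀ (d : PySem.Dict String (List String)), d.keys.Nodup →
    ps.foldl (fun cp p =>
        (if cp.contains p.1 then cp else cp.insert p.1 ([] : List String)).modify p.1 []
          (fun l => l ++ [p.2])) d
      = ps.foldl (fun cp p => cp.modify p.1 [] (fun l => l ++ [p.2])) d := by
  induction ps with
  | nil => intro d _; rfl
  | cons p ps ih =>
    intro d hnd
    simp only [List.foldl_cons]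
    rw [step_eq_modify d p.1 p.2 hnd]
    apply ih
    have := PySem.Dict.nodup_keys_foldl_modify_key [p] Prod.fst ([] : List String)
      (fun _ x => (fun l => l ++ [x.2])) d hnd
    simpa using this

-- A's nested loop over friends is the pair-wise fold over the flattened (candy, name) pairs.
theorem nested_foldl_eq_pairs (data : List (String × List String)) :
    ∀ (d : PySem.Dict String (List String)),
    data.foldl (fun cp friend =>
        friend.2.foldl (fun cp candy =>
          (if cp.contains candy then cp else cp.insert candy ([] : List String)).modify candy []
            (fun l => l ++ [friend.1])) cp) d
      = (data.flatMap (fun f => f.2.map (fun candy => (candy, f.1)))).foldl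
          (fun cp p =>
            (if cp.contains p.1 then cp else cp.insert p.1 ([] : List String)).modify p.1 []
              (fun l => l ++ [p.2])) d := by
  induction data with
  | nil => intro d; rfl
  | cons f rest ih =>
    intro d
    simp only [List.foldl_cons, List.flatMap_cons, List.foldl_append, List.foldl_map]
    exact ih _

-- ===== VERDICT (by name: the statement is the Claim_ definition above) =====
theorem create_new_candy_data_structure_spec : Claim_equal_create_new_candy_data_structure := by
  intro data _
  unfold Spec_create_new_candy_data_structure
  unfold create_new_candy_data_structure create_new_candy_data_structure_alt
  simp only []
  rw [nested_foldl_eq_pairs,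
      foldl_step_eq_foldl_modify _ _ (PySem.Dict.nodup_keys_empty)]
  set ps := data.flatMap (fun f => f.2.map (fun candy => (candy, f.1))) with hps
  have hnd : ((ps.foldl (fun cp p => cp.modify p.1 [] (fun l => l ++ [p.2])) PySem.Dict.empty)).keys.Nodup :=
    PySem.Dict.nodup_keys_foldl_modify_key ps Prod.fst ([] : List String)
      (fun _ x => (fun l => l ++ [x.2])) PySem.Dict.empty PySem.Dict.nodup_keys_empty
  rw [PySem.Dict.items_eq_map_keys _ hnd ([] : List String)]
  have hkeys : ((ps.foldl (fun cp p => cp.modify p.1 [] (fun l => l ++ [p.2])) PySem.Dict.empty)).keys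
      = PySem.List.dedup (ps.map (fun p => p.1)) := by
    have := PySem.Dict.keys_foldl_modify_key ps Prod.fst ([] : List String)
      (fun _ x => (fun l => l ++ [x.2])) PySem.Dict.empty
    rw [PySem.List.dedup_eq_ofList, ← PySem.Set.update_nil_left]
    simpa [PySem.Dict.keys_empty] using this
  rw [hkeys]
  apply List.map_congr_left
  intro c hc
  rw [PySem.Dict.getD_foldl_modify_append, PySem.Dict.getD_empty]
  simp
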